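-- pv_equiv track=rewrite | github.com/jchrzast/python-beginner-project | sudoku solver.py | is_guess_valid
-- ===== SOURCE A (Python) =====
-- def is_guess_valid(puzzle, guess, row, column):
--     # did that number appear in a row?
--     if guess in puzzle[row]:
--         return False
--
--     # did that number appear in a column?
--     some_column = [puzzle[i][column] for i in range(9)]
--     if guess in some_column:
--         return False
--
--     # did that number appear in a 3x3 square?
--
--     row_start = (row//3)*3          # for 0,1,2 = 0 || 3,4,5 = 1 || 6,7,8, = 2
--     column_start = (column//3)*3    # for 0,1,2 = 0 || 3,4,5 = 1 || 6,7,8, = 2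
--
--     for r in range(row_start, row_start + 3):
--         for c in range(column_start, column_start + 3):
--             if guess == puzzle[r][c]:
--                 return False
--
--     return True
-- ===== SOURCE B (Python) =====
-- def is_guess_valid(puzzle, guess, row, column):
--     # keep the row check first (preserves A's early False / exception order)
--     if guess in puzzle[row]:
--         return False
--     # single row-major scan of the whole 9x9 board: a cell conflicts if it
--     # holds guess and is a peer (same column, or same 3x3 box)
--     box_r = row // 3 * 3
--     box_c = column // 3 * 3
--     for i in range(9):
--         for j in range(9):
--             if puzzle[i][j] == guess and \
--                     (j == column or (box_r <= i < box_r + 3 and box_c <= j < box_c + 3)):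
--                 return False
--     return True
-- ===== Notes on version B (the rewrite author's own statement) =====
-- stated objective: alternative
-- what changed: After the row check, B replaces A's two targeted passes (a column gather plus a nested 3x3 loop over 18 peer cells) by one row-major scan of all 81 board cells with a single peer predicate (same column or same box) deciding each cell.
import Mathlib
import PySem

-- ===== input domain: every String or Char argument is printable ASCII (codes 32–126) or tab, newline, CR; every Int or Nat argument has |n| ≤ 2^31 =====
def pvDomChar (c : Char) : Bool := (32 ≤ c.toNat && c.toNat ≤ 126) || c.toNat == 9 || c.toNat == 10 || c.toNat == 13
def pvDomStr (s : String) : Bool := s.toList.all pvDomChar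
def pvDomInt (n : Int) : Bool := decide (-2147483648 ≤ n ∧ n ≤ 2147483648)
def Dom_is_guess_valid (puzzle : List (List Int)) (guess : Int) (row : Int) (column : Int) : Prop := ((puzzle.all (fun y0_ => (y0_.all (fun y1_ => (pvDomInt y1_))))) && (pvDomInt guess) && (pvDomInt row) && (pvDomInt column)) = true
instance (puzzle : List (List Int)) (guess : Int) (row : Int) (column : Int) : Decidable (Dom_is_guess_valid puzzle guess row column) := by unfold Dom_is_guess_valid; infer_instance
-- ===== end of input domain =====

-- B keeps the row check first, then replaces A's two targeted passes (column gather + nested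
-- 3x3 loop) by ONE row-major scan of all 81 board cells with a peer predicate. (alternative)

-- ===== PORT A =====
def is_guess_valid (puzzle : List (List Int)) (guess : Int) (row : Int) (column : Int) : Bool :=
  -- if guess in puzzle[row]: return False   (pyGetD total under Pre_)
  if guess ∈ PySem.List.pyGetD puzzle row [] then false
  else
    -- some_column = [puzzle[i][column] for i in range(9)]
    let some_column := (PySem.List.pyRange 0 9 1).map
      (fun i => PySem.List.pyGetD (PySem.List.pyGetD puzzle i []) column 0)
    if guess ∈ some_column then false
    else
      let row_start := PySem.Int.floordiv row 3 * 3
      let column_start := PySem.Int.floordiv column 3 * 3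
      -- nested for-loops with early 'return False' on a hit
      (PySem.List.pyRange row_start (row_start + 3) 1).all (fun r =>
        (PySem.List.pyRange column_start (column_start + 3) 1).all (fun c =>
          !(guess == PySem.List.pyGetD (PySem.List.pyGetD puzzle r []) c 0)))

-- ===== PORT B =====
def is_guess_valid_alt (puzzle : List (List Int)) (guess : Int) (row : Int) (column : Int) : Bool :=
  if guess ∈ PySem.List.pyGetD puzzle row [] then false
  else
    let box_r := PySem.Int.floordiv row 3 * 3
    let box_c := PySem.Int.floordiv column 3 * 3
    -- one row-major scan of the whole board; early return on a conflicting peer cell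
    (PySem.List.pyRange 0 9 1).all (fun i =>
      (PySem.List.pyRange 0 9 1).all (fun j =>
        !(PySem.List.pyGetD (PySem.List.pyGetD puzzle i []) j 0 == guess &&
          (j == column ||
            (decide (box_r ≤ i) && decide (i < box_r + 3) &&
             decide (box_c ≤ j) && decide (j < box_c + 3))))))

-- ===== PRECONDITION & SPEC =====
-- Pre_ restricts, after the row check, to the natural 9x9 sudoku domain: 0 ≤ row,column < 9 and
-- the first nine rows having at least nine entries.  Outside it A's negative-index wraparound and
-- out-of-board reads are accidental, and B's full-board scan raises or reads different cells.
def Pre_is_guess_valid (puzzle : List (List Int)) (guess : Int) (row : Int) (column : Int) : Prop :=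
  (-(puzzle.length : Int) ≤ row ∧ row < puzzle.length) ∧
  (guess ∈ PySem.List.pyGetD puzzle row [] ∨
    (0 ≤ row ∧ row < 9 ∧ 0 ≤ column ∧ column < 9 ∧ (9 : Int) ≤ puzzle.length ∧
      ∀ i ∈ PySem.List.pyRange 0 9 1, (9 : Int) ≤ (PySem.List.pyGetD puzzle i []).length))
instance (puzzle : List (List Int)) (guess : Int) (row : Int) (column : Int) : Decidable (Pre_is_guess_valid puzzle guess row column) := by unfold Pre_is_guess_valid; infer_instance

def pvWitness_is_guess_valid : List (List Int) × Int × Int × Int :=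
  ([[0,0,0,0,0,0,0,0,0],[0,0,0,0,0,0,0,0,0],[0,0,0,0,0,0,0,0,0],
    [0,0,0,0,0,0,0,0,0],[0,0,0,0,0,0,0,0,0],[0,0,0,0,0,0,0,0,0],
    [0,0,0,0,0,0,0,0,0],[0,0,0,0,0,0,0,0,0],[0,0,0,0,0,0,0,0,0]], 5, 0, 0)

def Spec_is_guess_valid (puzzle : List (List Int)) (guess : Int) (row : Int) (column : Int) (out : Bool) : Prop := out = is_guess_valid_alt puzzle guess row column
instance (puzzle : List (List Int)) (guess : Int) (row : Int) (column : Int) (out : Bool) : Decidable (Spec_is_guess_valid puzzle guess row column out) := by unfold Spec_is_guess_valid; infer_instance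

-- ===== CLAIM =====
def Claim_equal_is_guess_valid : Prop := ∀ (puzzle : List (List Int)) (guess : Int) (row : Int) (column : Int), Dom_is_guess_valid puzzle guess row column → Pre_is_guess_valid puzzle guess row column → Spec_is_guess_valid puzzle guess row column (is_guess_valid puzzle guess row column)

-- ===== LEMMAS AND PROOFS =====
-- (all reasoning is inside the single verdict proof below)
-- ===== VERDICT =====
theorem is_guess_valid_spec : Claim_equal_is_guess_valid := by
  intro puzzle guess row column _ hpre
  unfold Spec_is_guess_valid is_guess_valid is_guess_valid_alt
  by_cases hrow : guess ∈ PySem.List.pyGetD puzzle row []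
  · simp [hrow]
  · obtain ⟨_, hcase⟩ := hpre
    rcases hcase with h | ⟨hr0, hr9, hc0, hc9, _, _⟩
    · exact absurd h hrow
    simp only [if_neg hrow]
    have hfr : PySem.Int.floordiv row 3 = row / 3 :=
      PySem.Int.floordiv_eq_ediv_of_pos (by omega)
    have hfc : PySem.Int.floordiv column 3 = column / 3 :=
      PySem.Int.floordiv_eq_ediv_of_pos (by omega)
    set br := PySem.Int.floordiv row 3 * 3 with hbr
    set bc := PySem.Int.floordiv column 3 * 3 with hbc
    have hbrb : 0 ≤ br ∧ br + 3 ≤ 9 := by rw [hbr, hfr]; omega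
    have hbcb : 0 ≤ bc ∧ bc + 3 ≤ 9 := by rw [hbc, hfc]; omega
    by_cases hcol : guess ∈ (PySem.List.pyRange 0 9 1).map
        (fun i => PySem.List.pyGetD (PySem.List.pyGetD puzzle i []) column 0)
    · -- A returns False; B's scan hits the same column cell
      simp only [if_pos hcol]
      obtain ⟨i, hi, hcell⟩ := List.mem_map.mp hcol
      rw [PySem.List.mem_pyRange_one] at hi
      symm
      rw [Bool.eq_iff_iff]
      simp only [Bool.false_eq_true, iff_false]
      simp only [List.all_eq_true, PySem.List.mem_pyRange_one, Bool.not_eq_eq_eq_not,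
        Bool.not_true, Bool.and_eq_false_iff, beq_eq_false_iff_ne, ne_eq,
        Bool.or_eq_false_iff, decide_eq_false_iff_not, not_le, not_lt]
      intro hB
      rcases hB i (by omega) column (by omega) with h | ⟨h1, _⟩
      · exact h hcell
      · exact h1 rfl
    · simp only [if_neg hcol]
      rw [Bool.eq_iff_iff]
      simp only [List.all_eq_true, PySem.List.mem_pyRange_one, Bool.not_eq_eq_eq_not,
        Bool.not_true, Bool.and_eq_false_iff, beq_eq_false_iff_ne, ne_eq,
        Bool.or_eq_false_iff, decide_eq_false_iff_not, not_le, not_lt]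
      constructor
      · intro hA i hi j hj
        by_cases hcell : PySem.List.pyGetD (PySem.List.pyGetD puzzle i []) j 0 = guess
        · right
          refine ⟨fun hjc => hcol (List.mem_map.mpr
            ⟨i, PySem.List.mem_pyRange_one.mpr (by omega), by rw [← hjc]; exact hcell⟩), ?_⟩
          by_contra hbox
          exact hA i (by omega) j (by omega) hcell.symm
        · left; exact hcell
      · intro hB r hr c hc
        rcases hB r (by omega) c (by omega) with h | ⟨_, hbox⟩
        · exact fun he => h he.symm
        · exfalso; omega
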